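-- pv_equiv track=rewrite | github.com/rahult-github/nimble_compile_check | nimble_compile_check.py | _violates_example_constraints
-- ===== SOURCE A (Python) =====
-- BASE_CONFIG_DEFAULTS: dict[str, str] = {
--     'BT_ENABLED': 'y',
--     'BT_NIMBLE_ENABLED': 'y',
-- }
--
-- def _normalize_cfg_name(name: str) -> str:
--     return name[7:] if name.startswith('CONFIG_') else name
--
-- def _effective_config_value(
--     config_name: str,
--     toggles: list[tuple[str, str]],
--     flag_defaults: dict[str, str],
--     example_defaults: dict[str, str] | None = None,
-- ) -> str | None:
--     norm = _normalize_cfg_name(config_name)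
--     toggle_map = {_normalize_cfg_name(name): val for name, val in toggles}
--     if norm in toggle_map:
--         return toggle_map[norm]
--     if norm in BASE_CONFIG_DEFAULTS:
--         return BASE_CONFIG_DEFAULTS[norm]
--     if example_defaults and norm in example_defaults:
--         return example_defaults[norm]
--     return flag_defaults.get(norm)
--
-- def _violates_example_constraints(
--     example_name: str,
--     toggles: list[tuple[str, str]],
--     flag_defaults: dict[str, str],
--     example_defaults: dict[str, str] | None = None,
-- ) -> list[str]:
--     """Return per-example/folder constraint violations for this variant."""
--     normalized = normalize_example_name(example_name)
--     if normalized == 'hci' or normalized.startswith('hci/'):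
--         bt_enabled = _effective_config_value('BT_ENABLED', toggles, flag_defaults, example_defaults)
--         nimble_enabled = _effective_config_value('BT_NIMBLE_ENABLED', toggles, flag_defaults, example_defaults)
--         if bt_enabled == 'y' or nimble_enabled == 'y':
--             return ['HCI examples must keep BT_ENABLED=n and BT_NIMBLE_ENABLED=n.']
--         for cfg_name in flag_defaults:
--             if not cfg_name.startswith('BT_NIMBLE'):
--                 continue
--             if _effective_config_value(cfg_name, toggles, flag_defaults, example_defaults) == 'y':
--                 return ['HCI examples must keep all BT_NIMBLE* options disabled.']
--     return []
--
-- def normalize_example_name(example_name: str) -> str: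
--     normalized = example_name.strip().strip('/')
--     if normalized.startswith('examples/bluetooth/nimble/'):
--         return normalized[len('examples/bluetooth/nimble/') :]
--     if normalized.startswith('examples/bluetooth/'):
--         return normalized[len('examples/bluetooth/') :]
--     return normalized
-- ===== SOURCE B (Python) =====
-- BASE_CONFIG_DEFAULTS: dict[str, str] = {
--     'BT_ENABLED': 'y',
--     'BT_NIMBLE_ENABLED': 'y',
-- }
--
-- def _norm_name(name: str) -> str:
--     return name[7:] if name.startswith('CONFIG_') else name
--
-- def _violates_example_constraints(
--     example_name: str,
--     toggles: list[tuple[str, str]],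
--     flag_defaults: dict[str, str],
--     example_defaults: dict[str, str] | None = None,
-- ) -> list[str]:
--     """Return per-example/folder constraint violations for this variant."""
--     name = example_name.strip().strip('/')
--     for prefix in ('examples/bluetooth/nimble/', 'examples/bluetooth/'):
--         if name.startswith(prefix):
--             name = name[len(prefix):]
--             break
--     if name != 'hci' and not name.startswith('hci/'):
--         return []
--     # One merged effective-config table, layered in increasing precedence:
--     # flag_defaults < example_defaults < BASE_CONFIG_DEFAULTS < toggles.
--     merged = dict(flag_defaults)
--     if example_defaults:
--         merged.update(example_defaults)
--     merged.update(BASE_CONFIG_DEFAULTS)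
--     for name_t, val in toggles:
--         merged[_norm_name(name_t)] = val
--     if merged.get('BT_ENABLED') == 'y' or merged.get('BT_NIMBLE_ENABLED') == 'y':
--         return ['HCI examples must keep BT_ENABLED=n and BT_NIMBLE_ENABLED=n.']
--     if any(merged.get(_norm_name(k)) == 'y'
--            for k in flag_defaults if k.startswith('BT_NIMBLE')):
--         return ['HCI examples must keep all BT_NIMBLE* options disabled.']
--     return []
-- ===== Notes on version B (the rewrite author's own statement) =====
-- stated objective: alternative
-- what changed: A resolves each config lookup by rebuilding the normalized toggle map and walking the toggles/BASE/example/flag precedence chain inside every _effective_config_value call; B builds one merged effective-config dict by layering flag_defaults, example_defaults, BASE_CONFIG_DEFAULTS and the normalized toggles once, then answers every check (including the BT_NIMBLE* scan) with direct lookups in that table.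
import Mathlib
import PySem

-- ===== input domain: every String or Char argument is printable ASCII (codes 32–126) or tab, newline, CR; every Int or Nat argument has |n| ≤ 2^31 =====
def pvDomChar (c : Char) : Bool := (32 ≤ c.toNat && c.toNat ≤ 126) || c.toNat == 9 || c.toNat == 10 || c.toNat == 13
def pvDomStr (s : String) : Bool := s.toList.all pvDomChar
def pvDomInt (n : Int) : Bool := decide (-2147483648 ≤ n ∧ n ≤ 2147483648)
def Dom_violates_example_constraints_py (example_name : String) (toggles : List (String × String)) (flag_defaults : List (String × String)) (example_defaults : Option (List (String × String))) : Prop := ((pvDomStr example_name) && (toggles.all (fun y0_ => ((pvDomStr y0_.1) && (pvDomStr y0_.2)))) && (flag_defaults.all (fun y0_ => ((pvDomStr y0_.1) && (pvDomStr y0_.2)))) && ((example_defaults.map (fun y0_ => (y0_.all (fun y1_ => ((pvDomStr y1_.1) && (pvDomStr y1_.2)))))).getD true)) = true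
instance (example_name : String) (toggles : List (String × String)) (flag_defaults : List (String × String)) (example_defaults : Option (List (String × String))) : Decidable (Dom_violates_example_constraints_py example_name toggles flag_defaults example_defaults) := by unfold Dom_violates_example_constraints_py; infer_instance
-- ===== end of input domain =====

-- B replaces A's per-lookup precedence scan (which rebuilds the toggle map inside every
-- _effective_config_value call) by ONE merged effective-config dict built by layering the
-- sources in precedence order, then plain lookups; objective: alternative.

-- ===== PORT A =====
def pvBaseConfigDefaults : PySem.Dict String String :=
  PySem.Dict.ofList [("BT_ENABLED", "y"), ("BT_NIMBLE_ENABLED", "y")]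

def normalizeCfgNamePy (name : String) : String :=
  if PySem.Str.startswith name "CONFIG_" then PySem.Str.slice name (some 7) none else name

def effectiveConfigValuePy (config_name : String) (toggles : List (String × String))
    (flag_defaults : PySem.Dict String String)
    (example_defaults : Option (PySem.Dict String String)) : Option String :=
  let norm := normalizeCfgNamePy config_name
  let toggle_map := toggles.foldl (fun d p => d.insert (normalizeCfgNamePy p.1) p.2) PySem.Dict.empty
  if toggle_map.contains norm then toggle_map.get? norm
  else if pvBaseConfigDefaults.contains norm then pvBaseConfigDefaults.get? norm
  else
    match example_defaults with
    | some ed => if ed.size ≠ 0 && ed.contains norm then ed.get? norm else flag_defaults.get? norm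
    | none => flag_defaults.get? norm

def normalizeExampleNamePy (example_name : String) : String :=
  let normalized := PySem.Str.stripChars (PySem.Str.strip example_name) "/"
  if PySem.Str.startswith normalized "examples/bluetooth/nimble/" then
    PySem.Str.slice normalized (some 26) none
  else if PySem.Str.startswith normalized "examples/bluetooth/" then
    PySem.Str.slice normalized (some 19) none
  else normalized

-- the early-return 'for cfg_name in flag_defaults' loop of A
def hciFlagLoopPy (keys : List String) (toggles : List (String × String))
    (fd : PySem.Dict String String) (ed : Option (PySem.Dict String String)) : List String :=
  match keys with
  | [] => []
  | k :: rest =>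
    if !(PySem.Str.startswith k "BT_NIMBLE") then hciFlagLoopPy rest toggles fd ed
    else if effectiveConfigValuePy k toggles fd ed == some "y" then
      ["HCI examples must keep all BT_NIMBLE* options disabled."]
    else hciFlagLoopPy rest toggles fd ed

def violates_example_constraints_py (example_name : String) (toggles : List (String × String)) (flag_defaults : List (String × String)) (example_defaults : Option (List (String × String))) : List String :=
  let fd := PySem.Dict.ofList flag_defaults
  let ed := example_defaults.map PySem.Dict.ofList
  let normalized := normalizeExampleNamePy example_name
  if normalized == "hci" || PySem.Str.startswith normalized "hci/" then
    let bt_enabled := effectiveConfigValuePy "BT_ENABLED" toggles fd ed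
    let nimble_enabled := effectiveConfigValuePy "BT_NIMBLE_ENABLED" toggles fd ed
    if bt_enabled == some "y" || nimble_enabled == some "y" then
      ["HCI examples must keep BT_ENABLED=n and BT_NIMBLE_ENABLED=n."]
    else hciFlagLoopPy fd.keys toggles fd ed
  else []

-- ===== PORT B =====
def altNormName (name : String) : String :=
  if PySem.Str.startswith name "CONFIG_" then PySem.Str.slice name (some 7) none else name

-- Source B's for-loop over the two prefixes with break, unrolled
def altNormalizeExample (example_name : String) : String :=
  let name := PySem.Str.stripChars (PySem.Str.strip example_name) "/"
  if PySem.Str.startswith name "examples/bluetooth/nimble/" then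
    PySem.Str.slice name (some 26) none
  else if PySem.Str.startswith name "examples/bluetooth/" then
    PySem.Str.slice name (some 19) none
  else name

-- the single merged effective-config table of Source B
def altMerged (toggles : List (String × String)) (flag_defaults : List (String × String))
    (example_defaults : Option (List (String × String))) : PySem.Dict String String :=
  let merged := PySem.Dict.ofList flag_defaults
  let merged := match example_defaults with
    | some ed => if ed.isEmpty then merged else merged.update ed
    | none => merged
  let merged := merged.update [("BT_ENABLED", "y"), ("BT_NIMBLE_ENABLED", "y")]
  toggles.foldl (fun d p => d.insert (altNormName p.1) p.2) merged

def violates_example_constraints_py_alt (example_name : String) (toggles : List (String × String)) (flag_defaults : List (String × String)) (example_defaults : Option (List (String × String))) : List String :=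
  let name := altNormalizeExample example_name
  if !(name == "hci" || PySem.Str.startswith name "hci/") then []
  else
    let merged := altMerged toggles flag_defaults example_defaults
    if merged.get? "BT_ENABLED" == some "y" || merged.get? "BT_NIMBLE_ENABLED" == some "y" then
      ["HCI examples must keep BT_ENABLED=n and BT_NIMBLE_ENABLED=n."]
    else if (PySem.Dict.ofList flag_defaults).keys.any
        (fun k => PySem.Str.startswith k "BT_NIMBLE" && merged.get? (altNormName k) == some "y") then
      ["HCI examples must keep all BT_NIMBLE* options disabled."]
    else []

-- ===== PRECONDITION & SPEC =====
def Spec_violates_example_constraints_py (example_name : String) (toggles : List (String × String)) (flag_defaults : List (String × String)) (example_defaults : Option (List (String × String))) (out : List String) : Prop := out = violates_example_constraints_py_alt example_name toggles flag_defaults example_defaults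
instance (example_name : String) (toggles : List (String × String)) (flag_defaults : List (String × String)) (example_defaults : Option (List (String × String))) (out : List String) : Decidable (Spec_violates_example_constraints_py example_name toggles flag_defaults example_defaults out) := by unfold Spec_violates_example_constraints_py; infer_instance

-- ===== CLAIM (what is proved, stated in full; the proofs are below) =====
def Claim_equal_violates_example_constraints_py : Prop := ∀ (example_name : String) (toggles : List (String × String)) (flag_defaults : List (String × String)) (example_defaults : Option (List (String × String))), Dom_violates_example_constraints_py example_name toggles flag_defaults example_defaults → Spec_violates_example_constraints_py example_name toggles flag_defaults example_defaults (violates_example_constraints_py example_name toggles flag_defaults example_defaults)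

-- ===== LEMMAS AND PROOFS =====

-- lookup through a foldl of inserts from d = lookup in the loop-built dict, else in d
theorem get?_foldl_insert_key (key : String × String → String) (l : List (String × String))
    (d : PySem.Dict String String) (x : String) :
    (l.foldl (fun d p => d.insert (key p) p.2) d).get? x
      = ((l.foldl (fun d p => d.insert (key p) p.2) PySem.Dict.empty).get? x).or (d.get? x) := by
  induction l generalizing d with
  | nil => simp [PySem.Dict.get?_empty]
  | cons p t ih =>
    simp only [List.foldl_cons]
    rw [ih (d.insert (key p) p.2), ih (PySem.Dict.empty.insert (key p) p.2)]
    rw [Option.or_assoc]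
    congr 1
    rw [PySem.Dict.get?_insert, PySem.Dict.get?_insert]
    split
    · simp
    · simp [PySem.Dict.get?_empty]

theorem get?_update_eq (d : PySem.Dict String String) (l : List (String × String)) (x : String) :
    (d.update l).get? x = ((PySem.Dict.ofList l).get? x).or (d.get? x) :=
  get?_foldl_insert_key (fun p => p.1) l d x

theorem get?_toggles_eq (toggles : List (String × String)) (d : PySem.Dict String String) (x : String) :
    (toggles.foldl (fun d p => d.insert (altNormName p.1) p.2) d).get? x
      = ((toggles.foldl (fun d p => d.insert (altNormName p.1) p.2) PySem.Dict.empty).get? x).or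
          (d.get? x) :=
  get?_foldl_insert_key (fun p => altNormName p.1) toggles d x

theorem size_ne_zero_of_contains (d : PySem.Dict String String) (x : String)
    (h : d.contains x = true) : d.size ≠ 0 := by
  rw [PySem.Dict.contains_iff_mem_keys] at h
  have : d.keys ≠ [] := List.ne_nil_of_mem h
  simp only [PySem.Dict.keys] at this
  simp only [PySem.Dict.size]
  intro hlen
  exact this (by simpa using List.eq_nil_of_length_eq_zero (by simpa using hlen))

-- the heart: B's merged-table lookup equals A's precedence chain
theorem eff_eq_merged (c : String) (toggles : List (String × String))
    (flag_defaults : List (String × String)) (example_defaults : Option (List (String × String))) :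
    effectiveConfigValuePy c toggles (PySem.Dict.ofList flag_defaults)
        (example_defaults.map PySem.Dict.ofList)
      = (altMerged toggles flag_defaults example_defaults).get? (altNormName c) := by
  have hnorm : normalizeCfgNamePy = altNormName := rfl
  simp only [effectiveConfigValuePy, altMerged, hnorm]
  have hbase : PySem.Dict.ofList [("BT_ENABLED", "y"), ("BT_NIMBLE_ENABLED", "y")]
      = pvBaseConfigDefaults := rfl
  conv_rhs => rw [get?_toggles_eq, get?_update_eq, hbase]
  rw [PySem.Dict.contains_eq_isSome_get?]
  cases hTx : (toggles.foldl (fun d p => d.insert (altNormName p.1) p.2) PySem.Dict.empty).get?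
      (altNormName c) with
  | some v => simp
  | none =>
    simp only [Option.isSome_none, Bool.false_eq_true, if_false, Option.none_or]
    rw [PySem.Dict.contains_eq_isSome_get?]
    cases hBx : pvBaseConfigDefaults.get? (altNormName c) with
    | some v => simp
    | none =>
      simp only [Option.isSome_none, Bool.false_eq_true, if_false, Option.none_or]
      cases example_defaults with
      | none => rfl
      | some e =>
        simp only [Option.map_some]
        rw [PySem.Dict.contains_eq_isSome_get?]
        cases he : e.isEmpty with
        | true =>
          have : e = [] := by simpa using he
          subst this
          simp [PySem.Dict.get?_empty, PySem.Dict.ofList, PySem.Dict.update]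
        | false =>
          simp only [if_false, Bool.false_eq_true]
          rw [get?_update_eq]
          cases hEx : (PySem.Dict.ofList e).get? (altNormName c) with
          | some v =>
            have hc : (PySem.Dict.ofList e).contains (altNormName c) = true := by
              rw [PySem.Dict.contains_eq_isSome_get?, hEx]; rfl
            have hsz := size_ne_zero_of_contains _ _ hc
            simp [hsz]
          | none => simp

theorem flagLoop_eq_any (keys : List String) (toggles : List (String × String))
    (fd : PySem.Dict String String) (ed : Option (PySem.Dict String String)) :
    hciFlagLoopPy keys toggles fd ed
      = if keys.any (fun k => PySem.Str.startswith k "BT_NIMBLE"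
            && (effectiveConfigValuePy k toggles fd ed == some "y"))
        then ["HCI examples must keep all BT_NIMBLE* options disabled."] else [] := by
  induction keys with
  | nil => rfl
  | cons k rest ih =>
    unfold hciFlagLoopPy
    rw [List.any_cons]
    cases hs : PySem.Str.startswith k "BT_NIMBLE" with
    | false =>
      simp only [Bool.not_false, if_true, Bool.false_and, Bool.false_or]
      exact ih
    | true =>
      cases hv : (effectiveConfigValuePy k toggles fd ed == some "y") with
      | true =>
        simp only [Bool.not_true, Bool.false_eq_true, if_false, Bool.true_and,
          Bool.true_or, if_true]
      | false =>
        simp only [Bool.not_true, Bool.false_eq_true, if_false, Bool.true_and,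
          Bool.false_or]
        exact ih

-- ===== VERDICT (by name: the statement is the Claim_ definition above) =====
theorem violates_example_constraints_py_spec : Claim_equal_violates_example_constraints_py := by
  intro example_name toggles flag_defaults example_defaults _
  show violates_example_constraints_py _ _ _ _ = violates_example_constraints_py_alt _ _ _ _
  simp only [violates_example_constraints_py, violates_example_constraints_py_alt]
  rw [show normalizeExampleNamePy = altNormalizeExample from rfl]
  cases hguard : (altNormalizeExample example_name == "hci"
      || PySem.Str.startswith (altNormalizeExample example_name) "hci/") with
  | false => simp
  | true =>
    rw [if_pos (rfl : true = true)]
    simp only [Bool.not_true]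
    rw [if_neg Bool.false_ne_true]
    rw [eff_eq_merged "BT_ENABLED", eff_eq_merged "BT_NIMBLE_ENABLED"]
    have h1 : altNormName "BT_ENABLED" = "BT_ENABLED" := by decide
    have h2 : altNormName "BT_NIMBLE_ENABLED" = "BT_NIMBLE_ENABLED" := by decide
    rw [h1, h2]
    split
    · rfl
    · rw [flagLoop_eq_any]
      simp only [eff_eq_merged]
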